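-- pv_equiv track=rewrite | github.com/destaquesgovbr/docs | scripts/convert_md_to_docx.py | fix_lists_after_colon
-- ===== SOURCE A (Python) =====
-- def fix_lists_after_colon(text: str) -> str:
--     """
--     Corrige listas que aparecem após ':' para garantir formatação correta
--     Pandoc às vezes junta essas listas em um único parágrafo
--     """
--     lines = text.split('\n')
--     fixed_lines = []
--
--     for i, line in enumerate(lines):
--         fixed_lines.append(line)
--
--         # Se a linha termina com ':' e a próxima é uma lista
--         if line.strip().endswith(':') and i + 1 < len(lines):
--             next_line = lines[i + 1].strip()
--             # Se a próxima linha é uma lista (começa com - ou número.)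
--             if next_line.startswith('- ') or (len(next_line) > 2 and next_line[0].isdigit() and next_line[1:3] in ['. ', ') ']):
--                 # Adicionar linha em branco para forçar o Pandoc a reconhecer a lista
--                 fixed_lines.append('')
--
--     return '\n'.join(fixed_lines)
-- ===== SOURCE B (Python) =====
-- def _is_item(s):
--     return s.startswith('- ') or (len(s) > 2 and s[0].isdigit() and s[1:3] in ('. ', ') '))
--
--
-- def fix_lists_after_colon(text: str) -> str:
--     # Back-to-front: peel the last line off with rpartition, choosing the glue
--     # ('\n\n' when the preceding line ends with ':' and this line is a list item,
--     # else '\n') and prepend; no line list is ever built.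
--     out = ''
--     rest = text
--     while True:
--         pre, sep, last = rest.rpartition('\n')
--         if not sep:
--             return rest + out
--         prev = pre.rpartition('\n')[2]
--         glue = '\n\n' if prev.strip().endswith(':') and _is_item(last.strip()) else '\n'
--         out = glue + last + out
--         rest = pre
-- ===== Notes on version B (the rewrite author's own statement) =====
-- stated objective: alternative
-- what changed: Replaces A's forward pass over a split line list (enumerate with lines[i+1] lookahead, list accumulator, final join) by a back-to-front string loop that repeatedly peels the last line off with rpartition at the newline separator and prepends it with a single- or double-newline glue; no line list is ever built.
import Mathlib
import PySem

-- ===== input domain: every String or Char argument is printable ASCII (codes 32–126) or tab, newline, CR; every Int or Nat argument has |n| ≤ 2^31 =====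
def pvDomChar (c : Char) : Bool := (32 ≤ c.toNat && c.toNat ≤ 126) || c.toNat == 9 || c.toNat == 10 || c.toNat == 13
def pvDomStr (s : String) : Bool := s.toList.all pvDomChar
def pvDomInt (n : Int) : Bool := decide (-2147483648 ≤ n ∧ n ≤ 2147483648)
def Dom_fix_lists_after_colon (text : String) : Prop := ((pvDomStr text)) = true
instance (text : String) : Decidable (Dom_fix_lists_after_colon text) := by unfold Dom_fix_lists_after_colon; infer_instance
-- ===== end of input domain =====

-- B replaces A's forward line-list pass (split + enumerate + lines[i+1] lookahead + join) by a
-- back-to-front string loop that peels the last line off with rpartition('\n') and prepends it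
-- with the right glue; no line list is built. Same return value; objective: alternative.

-- ===== PORT A =====
-- "next_line.startswith('- ') or (len(next_line) > 2 and next_line[0].isdigit() and next_line[1:3] in ['. ', ') '])"
def aIsList (s : String) : Bool :=
  PySem.Str.startswith s "- " ||
    (decide (2 < PySem.Str.len s) &&
      ((PySem.Str.pyGet? s 0).map PySem.Chars.isdigit).getD false &&
      (PySem.Str.slice s (some 1) (some 3) == ". " || PySem.Str.slice s (some 1) (some 3) == ") "))

-- the body of A's "for i, line in enumerate(lines)" loop, acting on fixed_lines
def aStep (lines : List String) (acc : List String) (p : Int × String) : List String :=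
  let acc := acc ++ [p.2]
  if PySem.Str.endswith (PySem.Str.strip p.2) ":" && decide (p.1 + 1 < (lines.length : Int)) then
    -- lines[i + 1]: in range because of the guard just tested; the getD "" is never taken
    let next_line := PySem.Str.strip ((PySem.List.pyGet? lines (p.1 + 1)).getD "")
    if aIsList next_line then acc ++ [""] else acc
  else acc

def fix_lists_after_colon (text : String) : String :=
  let lines := (PySem.Str.split? text "\n").getD []   -- sep "\n" ≠ "": split? is always some
  let fixed_lines := (PySem.List.enumerate lines 0).foldl (aStep lines) []
  PySem.Str.join "\n" fixed_lines

-- ===== PORT B =====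
-- Source B's _is_item, on the code points
def bIsItem (s : List Char) : Bool :=
  PySem.Chars.startswith s ['-', ' '] ||
    (decide (2 < PySem.Chars.len s) &&
      ((PySem.Chars.pyGet? s 0).map PySem.Chars.isdigit).getD false &&
      (PySem.Chars.slice s (some 1) (some 3) == ['.', ' '] || PySem.Chars.slice s (some 1) (some 3) == [')', ' ']))

-- hand port of rest.rpartition('\n') (PySem has no rpartition): some (pre, last) = (pre, '\n', last)
-- split at the LAST '\n'; none = ('', '', rest), no '\n' present. Exact for this separator.
def rpartNl : List Char → Option (List Char × List Char)
  | [] => none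
  | c :: t =>
    match rpartNl t with
    | some (p, l) => some (c :: p, l)
    | none => if c = '\n' then some ([], t) else none

theorem rpartNl_eq_append : ∀ (s p l : List Char), rpartNl s = some (p, l) → s = p ++ '\n' :: l := by
  intro s
  induction s with
  | nil => intro p l h; simp [rpartNl] at h
  | cons c t ih =>
    intro p l h
    simp only [rpartNl] at h
    cases ht : rpartNl t with
    | some q =>
      rw [ht] at h
      cases h
      simpa using ih q.1 q.2 (by rw [ht])
    | none =>
      rw [ht] at h
      by_cases hc : c = '\n'
      · simp [hc] at h; simp [hc, ← h.1, ← h.2]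
      · simp [hc] at h

-- Source B's "while True" loop: repeatedly peel the last line off and prepend it to out
def bLoop (rest : List Char) (out : List Char) : List Char :=
  match h : rpartNl rest with
  | none => rest ++ out
  | some (pre, last) =>
    let prev := match rpartNl pre with | some (_, l) => l | none => pre
    let glue :=
      if PySem.Chars.endswith (PySem.Chars.strip prev) [':'] && bIsItem (PySem.Chars.strip last)
      then ['\n', '\n'] else ['\n']
    bLoop pre (glue ++ last ++ out)
termination_by rest.length
decreasing_by
  have := rpartNl_eq_append rest pre last h
  subst this; simp

def fix_lists_after_colon_alt (text : String) : String :=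
  String.ofList (bLoop text.toList [])

-- ===== PRECONDITION & SPEC =====
def Spec_fix_lists_after_colon (text : String) (out : String) : Prop := out = fix_lists_after_colon_alt text
instance (text : String) (out : String) : Decidable (Spec_fix_lists_after_colon text out) := by unfold Spec_fix_lists_after_colon; infer_instance

-- ===== CLAIM (what is proved, stated in full; the proofs are below) =====
def Claim_equal_fix_lists_after_colon : Prop := ∀ (text : String), Dom_fix_lists_after_colon text → Spec_fix_lists_after_colon text (fix_lists_after_colon text)

-- ===== LEMMAS AND PROOFS =====

-- ---- A-side: the foldl over enumerate equals a pairwise flatMap (as in the previous attempt) ----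
def pPiece (p : String × String) : List String :=
  if PySem.Str.endswith (PySem.Str.strip p.1) ":" && aIsList (PySem.Str.strip p.2) then [p.1, ""]
  else [p.1]

theorem aIsList_strip_empty : aIsList (PySem.Str.strip "") = false := by decide

theorem pPiece_sentinel (a : String) : pPiece (a, "") = [a] := by
  simp only [pPiece, aIsList_strip_empty, Bool.and_false, Bool.false_eq_true, if_false]

theorem loop_eq (lines : List String) :
    ∀ (l : List String) (k : Nat) (acc : List String),
      lines.drop k = l →
      List.foldl (aStep lines) acc (PySem.List.enumerate l (k : Int)) =
        acc ++ (l.zip (l.tail ++ [""])).flatMap pPiece := by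
  intro l
  induction l with
  | nil => intro k acc _; simp [PySem.List.enumerate]
  | cons a t ih =>
    intro k acc hdrop
    have hdrop' : lines.drop (k + 1) = t := by
      have := congrArg List.tail hdrop
      simpa [List.tail_drop] using this
    have hlen : lines.length = k + 1 + t.length := by
      have h1 : lines.length - k = t.length + 1 := by
        have := congrArg List.length hdrop
        simpa using this
      have h2 : k ≤ lines.length := by
        by_contra h
        rw [List.drop_eq_nil_of_le (le_of_lt (Nat.lt_of_not_le h))] at hdrop
        exact (List.cons_ne_nil a t) hdrop.symm
      omega
    rw [PySem.List.enumerate_cons, List.foldl_cons]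
    have hcast : (k : Int) + 1 = ((k + 1 : Nat) : Int) := by push_cast; ring
    rw [hcast, ih (k + 1) _ hdrop']
    cases t with
    | nil =>
      have hguard : (decide ((k : Int) + 1 < (lines.length : Int))) = false := by
        apply decide_eq_false
        simp only [List.length_nil] at hlen
        omega
      simp only [aStep, hguard, Bool.and_false, Bool.false_eq_true, if_false,
        List.tail_cons, List.nil_append, List.zip_cons_cons, List.zip_nil_left,
        List.flatMap_cons, List.flatMap_nil, List.append_nil, pPiece_sentinel]
    | cons b t' =>
      have hguard : (decide ((k : Int) + 1 < (lines.length : Int))) = true := by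
        apply decide_eq_true
        simp only [List.length_cons] at hlen
        omega
      have hget : PySem.List.pyGet? lines ((k : Int) + 1) = some b := by
        rw [hcast, PySem.List.pyGet?_natCast]
        have h0 : (lines.drop (k + 1))[0]? = some b := by rw [hdrop']; rfl
        simpa [List.getElem?_drop] using h0
      simp only [aStep, hget, hguard, Bool.and_true, Option.getD_some]
      cases hc : PySem.Str.endswith (PySem.Str.strip a) ":" <;>
        cases hl : aIsList (PySem.Str.strip b) <;>
          (simp only [List.tail_cons, List.cons_append, List.zip_cons_cons, List.flatMap_cons,
            pPiece, hc, hl, Bool.and_true, Bool.and_false,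
            Bool.false_eq_true, if_false, if_true]
           try simp)

-- ---- a structural form of splitOn s ['\n']: (first line, remaining lines) ----
def mySplit : List Char → List Char × List (List Char)
  | [] => ([], [])
  | c :: t =>
    let r := mySplit t
    if c = '\n' then ([], r.1 :: r.2) else (c :: r.1, r.2)

theorem go_eq : ∀ (l : List Char) (fuel : Nat), l.length < fuel → ∀ (cur : List Char) (acc : List (List Char)),
    PySem.Chars.splitOn.go ['\n'] fuel l cur acc
      = acc.reverse ++ (cur.reverse ++ (mySplit l).1) :: (mySplit l).2 := by
  intro l
  induction l with
  | nil =>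
    intro fuel hf cur acc
    match fuel, hf with
    | fuel+1, _ => simp [PySem.Chars.splitOn.go, mySplit]
  | cons c t ih =>
    intro fuel hf cur acc
    match fuel, hf with
    | fuel+1, hf =>
      by_cases hc : c = '\n'
      · subst hc
        rw [PySem.Chars.splitOn.go]
        simp only [List.isPrefixOf, BEq.rfl, Bool.true_and, if_pos]
        simp only [List.length_cons, List.drop_succ_cons, List.length_nil, List.drop_zero]
        rw [ih fuel (by simpa using hf) [] _]
        simp [mySplit]
      · rw [PySem.Chars.splitOn.go]
        have hpre : ['\n'].isPrefixOf (c :: t) = false := by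
          simp [List.isPrefixOf]; exact fun h => absurd h.symm hc
        rw [hpre]
        simp only [Bool.false_eq_true, if_false]
        rw [ih fuel (by simpa using hf) (c :: cur) acc]
        simp [mySplit, hc]

theorem splitOn_eq (s : List Char) :
    PySem.Chars.splitOn s ['\n'] = (mySplit s).1 :: (mySplit s).2 := by
  have := go_eq s (s.length + 1) (by omega) [] []
  simpa [PySem.Chars.splitOn] using this

-- join ['\n'] is a left inverse of mySplit, and the split pieces are '\n'-free
theorem join_mySplit (s : List Char) :
    PySem.Chars.join ['\n'] ((mySplit s).1 :: (mySplit s).2) = s := by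
  induction s with
  | nil => simp [mySplit, PySem.Chars.join_singleton]
  | cons c t ih =>
    by_cases hc : c = '\n'
    · subst hc
      have hm : mySplit ('\n' :: t) = ([], (mySplit t).1 :: (mySplit t).2) := by simp [mySplit]
      rw [hm]
      rw [show (([], (mySplit t).1 :: (mySplit t).2) : List Char × List (List Char)).1 = [] from rfl]
      rw [show (([], (mySplit t).1 :: (mySplit t).2) : List Char × List (List Char)).2 = (mySplit t).1 :: (mySplit t).2 from rfl]
      rw [PySem.Chars.join_cons_cons, ih]
      rfl
    · simp only [mySplit, if_neg hc]
      cases h2 : (mySplit t).2 with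
      | nil =>
        rw [h2] at ih
        simp only [PySem.Chars.join_singleton] at ih ⊢
        rw [ih]
      | cons y t2 =>
        rw [h2] at ih
        rw [PySem.Chars.join_cons_cons] at ih ⊢
        simp only [List.cons_append] at ih ⊢
        rw [List.append_assoc] at ih ⊢
        simpa using ih

theorem no_nl_mySplit (s : List Char) :
    ∀ p ∈ (mySplit s).1 :: (mySplit s).2, '\n' ∉ p := by
  induction s with
  | nil => simp [mySplit]
  | cons c t ih =>
    by_cases hc : c = '\n'
    · subst hc; simpa [mySplit] using ih
    · intro p hp hmem
      have hp' : p = c :: (mySplit t).1 ∨ p ∈ (mySplit t).2 := by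
        simpa [mySplit, hc] using hp
      rcases hp' with h | h
      · subst h
        rcases List.mem_cons.mp hmem with h2 | h2
        · exact hc h2.symm
        · exact ih _ (List.mem_cons_self ..) h2
      · exact ih _ (List.mem_cons_of_mem _ h) hmem

-- ---- rpartition facts ----
theorem rpartNl_none (l : List Char) (h : '\n' ∉ l) : rpartNl l = none := by
  induction l with
  | nil => rfl
  | cons c t ih =>
    have hc : c ≠ '\n' := fun he => h (he ▸ List.mem_cons_self ..)
    have ht : '\n' ∉ t := fun hm => h (List.mem_cons_of_mem _ hm)
    simp [rpartNl, ih ht, fun he => hc he]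

theorem rpartNl_append (p l : List Char) (h : '\n' ∉ l) :
    rpartNl (p ++ '\n' :: l) = some (p, l) := by
  induction p with
  | nil => simp [rpartNl, rpartNl_none l h]
  | cons c q ih => simp [rpartNl, ih]

-- the character-level condition and glue
def cGlue (a b : List Char) : List Char :=
  if PySem.Chars.endswith (PySem.Chars.strip a) [':'] && bIsItem (PySem.Chars.strip b)
  then ['\n', '\n'] else ['\n']

-- the fixed text, per line list
def body : List (List Char) → List Char
  | [] => []
  | [a] => a
  | a :: b :: t => a ++ cGlue a b ++ body (b :: t)

theorem join_append_singleton : ∀ (init : List (List Char)) (l : List Char), init ≠ [] →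
    PySem.Chars.join ['\n'] (init ++ [l]) = PySem.Chars.join ['\n'] init ++ '\n' :: l
  | [a], l, _ => by
      simp [PySem.Chars.join_cons_cons, PySem.Chars.join_singleton]
  | a :: b :: t, l, _ => by
      have ih := join_append_singleton (b :: t) l (by simp)
      have e1 : (a :: b :: t) ++ [l] = a :: ((b :: t) ++ [l]) := rfl
      have e2 : (b :: t) ++ [l] = b :: (t ++ [l]) := rfl
      rw [e1, e2, PySem.Chars.join_cons_cons, ← e2, ih, PySem.Chars.join_cons_cons]
      simp

theorem body_append : ∀ (init : List (List Char)) (l : List Char), init ≠ [] →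
    body (init ++ [l]) = body init ++ cGlue (init.getLastD []) l ++ l
  | [a], l, _ => by simp [body]
  | a :: b :: t, l, _ => by
      have ih := body_append (b :: t) l (by simp)
      have e2 : (b :: t) ++ [l] = b :: (t ++ [l]) := rfl
      have e1 : (a :: b :: t) ++ [l] = a :: b :: (t ++ [l]) := rfl
      rw [e1]
      show a ++ cGlue a b ++ body (b :: (t ++ [l])) = _
      rw [← e2, ih]
      have hg : (b :: t).getLastD [] = (a :: b :: t).getLastD [] := by
        simp
      rw [hg]
      show _ = a ++ cGlue a b ++ body (b :: t) ++ _ ++ l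
      simp [List.append_assoc]

theorem lastLine_join (init : List (List Char)) (h : init ≠ [])
    (hn : ∀ p ∈ init, '\n' ∉ p) :
    (match rpartNl (PySem.Chars.join ['\n'] init) with
      | some (_, l) => l
      | none => PySem.Chars.join ['\n'] init) = init.getLastD [] := by
  induction init using List.reverseRecOn with
  | nil => exact absurd rfl h
  | append_singleton init l ih =>
    cases hi : init with
    | nil =>
      subst hi
      simp only [List.nil_append, PySem.Chars.join_singleton]
      rw [rpartNl_none l (hn l (by simp))]
      simp
    | cons a t =>
      rw [← hi]
      rw [join_append_singleton init l (by simp [hi])]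
      rw [rpartNl_append _ _ (hn l (by simp))]
      rw [hi]
      have hlast : (a :: (t ++ [l])).getLast? = some l := by
        rw [← List.cons_append]; exact List.getLast?_concat
      simp [List.getLastD_eq_getLast?, hlast]

theorem bLoop_join (init : List (List Char)) (h : init ≠ [])
    (hn : ∀ p ∈ init, '\n' ∉ p) :
    ∀ out, bLoop (PySem.Chars.join ['\n'] init) out = body init ++ out := by
  induction init using List.reverseRecOn with
  | nil => exact absurd rfl h
  | append_singleton init l ih =>
    intro out
    cases hi : init with
    | nil =>
      subst hi
      simp only [List.nil_append, PySem.Chars.join_singleton]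
      rw [bLoop, rpartNl_none l (hn l (by simp))]
      rfl
    | cons a t =>
      rw [← hi]
      have hne : init ≠ [] := by simp [hi]
      have hn' : ∀ p ∈ init, '\n' ∉ p := fun p hp => hn p (List.mem_append_left _ hp)
      rw [join_append_singleton init l hne]
      rw [bLoop, rpartNl_append _ _ (hn l (by simp))]
      simp only
      rw [lastLine_join init hne hn']
      rw [ih hne hn']
      rw [body_append init l hne]
      simp [cGlue]

-- ---- A-side output equals body, at the character level ----
theorem ofList_beq (l : List Char) (t : String) : (String.ofList l == t) = (l == t.toList) := by
  by_cases h : l = t.toList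
  · subst h; simp
  · have h2 : String.ofList l ≠ t := fun he => h (by rw [← he]; simp)
    simp [h, h2]

theorem aIsList_toList (s : String) : aIsList s = bIsItem s.toList := by
  simp [aIsList, bIsItem, PySem.Str.slice, PySem.Chars.len, ofList_beq]

theorem cond_ofList (a b : List Char) :
    (PySem.Str.endswith (PySem.Str.strip (String.ofList a)) ":" &&
      aIsList (PySem.Str.strip (String.ofList b))) =
    (PySem.Chars.endswith (PySem.Chars.strip a) [':'] && bIsItem (PySem.Chars.strip b)) := by
  rw [aIsList_toList, PySem.Str.endswith_eq]
  simp [PySem.Str.toList_strip]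

def flatC (ls : List (List Char)) : List String :=
  ((ls.map String.ofList).zip ((ls.map String.ofList).tail ++ [""])).flatMap pPiece

theorem pPiece_ne_nil (p : String × String) : pPiece p ≠ [] := by
  unfold pPiece; split <;> simp

theorem flatC_ne_nil (a : List Char) (t : List (List Char)) : flatC (a :: t) ≠ [] := by
  cases t with
  | nil =>
    simp only [flatC, List.map_cons, List.map_nil, List.tail_cons, List.nil_append,
      List.zip_cons_cons, List.zip_nil_left, List.flatMap_cons, List.flatMap_nil, List.append_nil]
    exact pPiece_ne_nil _
  | cons b t2 =>
    simp only [flatC, List.map_cons, List.tail_cons, List.cons_append, List.zip_cons_cons,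
      List.flatMap_cons]
    intro hcontra
    exact pPiece_ne_nil _ (List.append_eq_nil_iff.mp hcontra).1

theorem toList_nl : "\n".toList = ['\n'] := rfl

theorem strJoin_toList (zs : List String) :
    (PySem.Str.join "\n" zs).toList = PySem.Chars.join ['\n'] (zs.map String.toList) := by
  simp [PySem.Str.join, toList_nl]

theorem join_flatC : ∀ (ls : List (List Char)), ls ≠ [] →
    (PySem.Str.join "\n" (flatC ls)).toList = body ls
  | [a], _ => by
      simp only [flatC, List.map_cons, List.map_nil, List.tail_cons, List.nil_append,
        List.zip_cons_cons, List.zip_nil_left, List.flatMap_cons, List.flatMap_nil,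
        List.append_nil, pPiece_sentinel]
      rw [strJoin_toList]
      simp [PySem.Chars.join_singleton, body]
  | a :: b :: t, _ => by
      have ihr := join_flatC (b :: t) (by simp)
      have hsplit : flatC (a :: b :: t) = pPiece (String.ofList a, String.ofList b) ++ flatC (b :: t) := by
        simp [flatC]
      rcases List.exists_cons_of_ne_nil (flatC_ne_nil b t) with ⟨y, ys, hys⟩
      rw [hsplit, hys]
      rw [hys, strJoin_toList] at ihr
      rw [strJoin_toList]
      simp only [pPiece, cond_ofList]
      by_cases hc : (PySem.Chars.endswith (PySem.Chars.strip a) [':'] && bIsItem (PySem.Chars.strip b)) = true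
      · rw [if_pos hc]
        simp only [List.cons_append, List.nil_append, List.map_cons, String.toList_ofList]
        rw [PySem.Chars.join_cons_cons, PySem.Chars.join_cons_cons]
        rw [show "".toList = ([] : List Char) from rfl]
        rw [show List.map String.toList (y :: ys) = String.toList y :: List.map String.toList ys from rfl] at ihr
        rw [ihr]
        simp [body, cGlue, hc]
      · rw [if_neg hc]
        simp only [List.cons_append, List.nil_append, List.map_cons, String.toList_ofList]
        rw [PySem.Chars.join_cons_cons]
        rw [show List.map String.toList (y :: ys) = String.toList y :: List.map String.toList ys from rfl] at ihr
        rw [ihr]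
        simp [body, cGlue, hc]

-- ===== VERDICT (by name: the statement is the Claim_ definition above) =====
theorem fix_lists_after_colon_spec : Claim_equal_fix_lists_after_colon := by
  intro text _
  unfold Spec_fix_lists_after_colon fix_lists_after_colon fix_lists_after_colon_alt
  have hsplit : (PySem.Str.split? text "\n").getD [] =
      ((mySplit text.toList).1 :: (mySplit text.toList).2).map String.ofList := by
    have hb := PySem.Str.split?_map text "\n"
    have hch : PySem.Chars.split? text.toList "\n".toList =
        some ((mySplit text.toList).1 :: (mySplit text.toList).2) := by
      simp [PySem.Chars.split?, splitOn_eq]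
    rw [hch] at hb
    cases hs : PySem.Str.split? text "\n" with
    | none => rw [hs] at hb; simp at hb
    | some parts =>
      rw [hs] at hb
      simp only [Option.map_some, Option.some.injEq] at hb
      simp only [Option.getD_some]
      rw [← hb]
      have hmap : List.map (String.ofList ∘ String.toList) parts = List.map id parts :=
        List.map_congr_left (fun p _ => by simp)
      simpa using hmap.symm
  set L := (mySplit text.toList).1 :: (mySplit text.toList).2 with hL
  have h1 := loop_eq (L.map String.ofList) (L.map String.ofList) 0 [] (by simp)
  rw [hsplit]
  show PySem.Str.join "\n" (List.foldl (aStep (L.map String.ofList)) []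
      (PySem.List.enumerate (L.map String.ofList) 0)) = String.ofList (bLoop text.toList [])
  rw [show ((0 : Int)) = ((0 : Nat) : Int) from rfl, h1]
  simp only [List.nil_append]
  have hflat : ((L.map String.ofList).zip ((L.map String.ofList).tail ++ [""])).flatMap pPiece = flatC L := rfl
  rw [hflat]
  have hLne : L ≠ [] := by simp [hL]
  have h3 := join_flatC L hLne
  have h4 := bLoop_join L hLne (by rw [hL]; exact no_nl_mySplit text.toList) []
  rw [join_mySplit text.toList] at h4
  rw [h4]
  simp only [List.append_nil]
  rw [← h3]
  simp [PySem.Str.join, toList_nl]
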